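-- pv_equiv track=rewrite | github.com/sukinoaria/HSLM | basic/utils.py | build_pair
-- ===== SOURCE A (Python) =====
-- def get_entity_boundary(preds):
--     # get cur instance aspect entity list
--     entityList = []
--     for idy in range(len(preds)):
--         if preds[idy] == 1:
--             if idy == len(preds) - 1:
--                 entityList.append([idy, idy + 1])
--             else:
--                 for k in range(idy + 1, len(preds)):
--                     if preds[k] != preds[idy] + 1:
--                         entityList.append([idy, k])
--                         break
--                     elif preds[k] == preds[idy] + 1 and k == len(preds) - 1:
--                         entityList.append([idy, k + 1])
--                         break
--     return entityList
--
-- def build_pair(aspect_results, opinion_results):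
--
--     asp_result = []
--     opi_result = []
--     asp_opi_result = []
--
--     for idx in range(len(aspect_results)):
--         cur_instance_opi_result = []
--         cur_instance_asp_opi_result = []
--
--         entity_list = get_entity_boundary(aspect_results[idx])
--         asp_result.append(entity_list)
--
--         # use aspect entity list to find mapped opinion entity results
--         for asp_start,asp_end in entity_list:
--             # 使用aspect第一个单词对应的opinion tag 判断结果
--             opi_list = get_entity_boundary(opinion_results[idx][asp_start])
--             for opi_start,opi_end in opi_list:
--                 cur_instance_asp_opi_result.append([opi_start, opi_end, asp_start, asp_end])
--
--         asp_opi_result.append(cur_instance_asp_opi_result)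
--
--         # 单独的opinion结果提取
--         for idy in range(len(aspect_results[idx])):
--             opi_res = get_entity_boundary(opinion_results[idx][idy])
--             cur_instance_opi_result += opi_res
--         opi_result.append(cur_instance_opi_result)
--
--     return asp_result,opi_result,asp_opi_result
-- ===== SOURCE B (Python) =====
-- def extract_spans(preds):
--     spans = []
--     start = None
--     for i, v in enumerate(preds):
--         if v == 1:
--             if start is not None:
--                 spans.append([start, i])
--             start = i
--         elif v != 2:
--             if start is not None:
--                 spans.append([start, i])
--             start = None
--     if start is not None:
--         spans.append([start, len(preds)])
--     return spans
--
-- def build_pair(aspect_results, opinion_results):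
--     asp_result = [extract_spans(row) for row in aspect_results]
--     opi_result = []
--     asp_opi_result = []
--     for a_row, o_rows, spans in zip(aspect_results, opinion_results, asp_result):
--         asp_opi_result.append([[os, oe, s, e]
--                                for s, e in spans
--                                for os, oe in extract_spans(o_rows[s])])
--         opi_result.append([sp for r in o_rows[:len(a_row)] for sp in extract_spans(r)])
--     return asp_result, opi_result, asp_opi_result
-- ===== Notes on version B (the rewrite author's own statement) =====
-- stated objective: simpler
-- what changed: get_entity_boundary's per-begin-tag inner break-scan is replaced by a single linear state-machine pass that keeps one optional open-span start, and build_pair's index-based triple-accumulator loop becomes map/zip comprehensions.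
-- outside the precondition, e.g. on build_pair([[]], []): A returns ([[]], [[]], [[]]), B returns ([[]], [], [])
import Mathlib
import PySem

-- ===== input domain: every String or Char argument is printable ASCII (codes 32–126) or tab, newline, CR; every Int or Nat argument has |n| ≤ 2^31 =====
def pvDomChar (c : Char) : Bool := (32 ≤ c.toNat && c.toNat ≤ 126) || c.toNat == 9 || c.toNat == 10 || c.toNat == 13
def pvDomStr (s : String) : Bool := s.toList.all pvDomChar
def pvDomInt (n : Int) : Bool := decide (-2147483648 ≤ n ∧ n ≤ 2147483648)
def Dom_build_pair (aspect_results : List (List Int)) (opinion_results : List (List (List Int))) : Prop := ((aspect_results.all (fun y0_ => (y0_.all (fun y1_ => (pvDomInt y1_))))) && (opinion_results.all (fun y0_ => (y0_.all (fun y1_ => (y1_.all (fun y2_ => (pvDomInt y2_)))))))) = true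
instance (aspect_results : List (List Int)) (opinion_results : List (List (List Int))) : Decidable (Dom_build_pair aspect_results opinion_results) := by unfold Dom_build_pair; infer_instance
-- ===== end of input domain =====

-- B replaces A's per-begin-tag inner break-scan by one linear state-machine pass over the tag row
-- (optional open-span start) and build_pair's index loops by map/zipWith; objective: simpler.


-- ===== PORT A =====
-- inner `for k in range(idy+1, len(preds)) … break` loop of get_entity_boundary
def geb_inner (preds : List Int) (idy k : Nat) : List (List Int) :=
  if _h : k < preds.length then
    if preds.getD k 0 ≠ preds.getD idy 0 + 1 then [[(idy : Int), (k : Int)]]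
    else if preds.getD k 0 = preds.getD idy 0 + 1 ∧ k = preds.length - 1 then
      [[(idy : Int), (k : Int) + 1]]
    else geb_inner preds idy (k + 1)
  else []
termination_by preds.length - k

def get_entity_boundary (preds : List Int) : List (List Int) :=
  (List.range preds.length).foldl (fun entityList idy =>
    if preds.getD idy 0 = 1 then
      if idy = preds.length - 1 then entityList ++ [[(idy : Int), (idy : Int) + 1]]
      else entityList ++ geb_inner preds idy (idy + 1)
    else entityList) []

-- body of the inner `for opi_start,opi_end in opi_list: cur….append([…])` loop
def bp_ao_inner (s e : Int) (acc2 : List (List Int)) (op : List Int) : List (List Int) :=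
  match op with
  | [os, oe] => acc2 ++ [[os, oe, s, e]]
  | _ => acc2

-- body of `for asp_start,asp_end in entity_list: …`
def bp_ao_step (orow : List (List Int)) (acc : List (List Int)) (sp : List Int) : List (List Int) :=
  match sp with
  | [s, e] => (get_entity_boundary (orow.getD s.toNat [])).foldl (bp_ao_inner s e) acc
  | _ => acc

def bp_ao (a : List (List Int)) (o : List (List (List Int))) (idx : Nat) : List (List Int) :=
  (get_entity_boundary (a.getD idx [])).foldl (bp_ao_step (o.getD idx [])) []

-- body of `for idy in range(len(aspect_results[idx])): cur_instance_opi_result += …`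
def bp_opi (a : List (List Int)) (o : List (List (List Int))) (idx : Nat) : List (List Int) :=
  (List.range (a.getD idx []).length).foldl (fun acc idy =>
    acc ++ get_entity_boundary ((o.getD idx []).getD idy [])) []

def build_pair (aspect_results : List (List Int)) (opinion_results : List (List (List Int))) : List (List (List Int)) × List (List (List Int)) × List (List (List Int)) :=
  (List.range aspect_results.length).foldl (fun st idx =>
    (st.1 ++ [get_entity_boundary (aspect_results.getD idx [])],
     st.2.1 ++ [bp_opi aspect_results opinion_results idx],
     st.2.2 ++ [bp_ao aspect_results opinion_results idx])) ([], [], [])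

-- ===== PORT B =====
-- single forward pass keeping the optional start of the currently open span
def extract_go : List Int → Int → Option Int → List (List Int)
  | [], i, st => (match st with | some s => [[s, i]] | none => [])
  | v :: r, i, st =>
      if v = 1 then
        (match st with | some s => [[s, i]] | none => []) ++ extract_go r (i + 1) (some i)
      else if v = 2 then extract_go r (i + 1) st
      else (match st with | some s => [[s, i]] | none => []) ++ extract_go r (i + 1) none

def extract_spans (preds : List Int) : List (List Int) := extract_go preds 0 none

def mk4 (s e : Int) (op : List Int) : List Int :=
  match op with
  | [os, oe] => [os, oe, s, e]
  | _ => []           -- unreachable: spans are always pairs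

def bp_alt_item (o_rows : List (List Int)) (sp : List Int) : List (List Int) :=
  match sp with
  | [s, e] => (extract_spans (o_rows.getD s.toNat [])).map (mk4 s e)
  | _ => []           -- unreachable: spans are always pairs

def bp_alt_ao (a_row : List Int) (o_rows : List (List Int)) : List (List Int) :=
  (extract_spans a_row).flatMap (bp_alt_item o_rows)

def build_pair_alt (aspect_results : List (List Int)) (opinion_results : List (List (List Int))) : List (List (List Int)) × List (List (List Int)) × List (List (List Int)) :=
  (aspect_results.map extract_spans,
   List.zipWith (fun a_row o_rows => (o_rows.take a_row.length).flatMap extract_spans)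
     aspect_results opinion_results,
   List.zipWith bp_alt_ao aspect_results opinion_results)

-- ===== PRECONDITION & SPEC =====
-- Pre_ excludes the inputs on which A raises IndexError (opinion_results shorter than
-- aspect_results, or an opinion row shorter than its aspect row: A indexes opinion_results[idx][idy]
-- for every idy below len(aspect_results[idx])); it also excludes the corner where opinion_results is
-- shorter than aspect_results yet A returns because every extra aspect row is empty — there B's zip
-- truncates its per-instance lists, and both shapes are defensible.
def Pre_build_pair (aspect_results : List (List Int)) (opinion_results : List (List (List Int))) : Prop :=
  aspect_results.length ≤ opinion_results.length ∧
  ∀ i ∈ List.range aspect_results.length,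
    (aspect_results.getD i []).length ≤ (opinion_results.getD i []).length

instance (aspect_results : List (List Int)) (opinion_results : List (List (List Int))) : Decidable (Pre_build_pair aspect_results opinion_results) := by unfold Pre_build_pair; infer_instance

def pvWitness_build_pair : List (List Int) × List (List (List Int)) :=
  ([[1, 2, 0], [0]], [[[0, 1], [1, 2, 2], [1]], [[1, 1]]])

def Spec_build_pair (aspect_results : List (List Int)) (opinion_results : List (List (List Int))) (out : List (List (List Int)) × List (List (List Int)) × List (List (List Int))) : Prop := out = build_pair_alt aspect_results opinion_results
instance (aspect_results : List (List Int)) (opinion_results : List (List (List Int))) (out : List (List (List Int)) × List (List (List Int)) × List (List (List Int))) : Decidable (Spec_build_pair aspect_results opinion_results out) := by unfold Spec_build_pair; infer_instance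

-- ===== CLAIM (what is proved, stated in full; the proofs are below) =====
def Claim_equal_build_pair : Prop := ∀ (aspect_results : List (List Int)) (opinion_results : List (List (List Int))), Dom_build_pair aspect_results opinion_results → Pre_build_pair aspect_results opinion_results → Spec_build_pair aspect_results opinion_results (build_pair aspect_results opinion_results)

-- ===== LEMMAS AND PROOFS =====

-- first index (relative) of an entry ≠ 2, or the length of the list
def fn2 : List Int → Int
  | [] => 0
  | v :: r => if v = 2 then fn2 r + 1 else 0

-- reference form of the extracted spans, at absolute offset i
def spansSpec : List Int → Int → List (List Int)
  | [], _ => []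
  | v :: r, i => (if v = 1 then [[i, i + 1 + fn2 r]] else []) ++ spansSpec r (i + 1)

theorem flatMap_congr' {α β : Type} {l : List α} {f g : α → List β}
    (h : ∀ x ∈ l, f x = g x) : l.flatMap f = l.flatMap g := by
  induction l with
  | nil => rfl
  | cons x t ih =>
      simp only [List.flatMap_cons, h x (List.mem_cons_self ..),
        ih (fun y hy => h y (List.mem_cons_of_mem _ hy))]

theorem spansSpec_pairs (l : List Int) (i : Int) :
    ∀ x ∈ spansSpec l i, ∃ a b, x = [a, b] := by
  induction l generalizing i with
  | nil => intro x hx; simp [spansSpec] at hx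
  | cons v r ih =>
      intro x hx
      simp only [spansSpec, List.mem_append] at hx
      rcases hx with hx | hx
      · by_cases hv : v = 1
        · simp [hv] at hx; exact ⟨_, _, hx⟩
        · simp [hv] at hx
      · exact ih (i + 1) x hx

theorem extract_go_eq (l : List Int) (i : Int) (st : Option Int) :
    extract_go l i st =
      (match st with | some s => [[s, i + fn2 l]] | none => []) ++ spansSpec l i := by
  induction l generalizing i st with
  | nil => cases st <;> simp [extract_go, fn2, spansSpec]
  | cons v r ih =>
      by_cases h1 : v = 1
      · cases st <;>
          simp [extract_go, h1, spansSpec, fn2, ih]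
      · by_cases h2 : v = 2
        · cases st <;>
            (simp [extract_go, h2, ih, spansSpec, fn2]; try ring_nf)
        · cases st <;>
            simp [extract_go, h1, h2, spansSpec, fn2, ih]

theorem extract_spans_eq (l : List Int) : extract_spans l = spansSpec l 0 := by
  simpa using extract_go_eq l 0 none

theorem geb_inner_eq (preds : List Int) (idy : Nat) :
    ∀ k, k < preds.length → preds.getD idy 0 = 1 →
      geb_inner preds idy k = [[(idy : Int), (k : Int) + fn2 (preds.drop k)]] := by
  suffices H : ∀ n k, preds.length - k ≤ n → k < preds.length → preds.getD idy 0 = 1 →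
      geb_inner preds idy k = [[(idy : Int), (k : Int) + fn2 (preds.drop k)]] by
    intro k hk h1; exact H (preds.length - k) k le_rfl hk h1
  intro n
  induction n with
  | zero => intro k hle hk h1; omega
  | succ m ih =>
      intro k hle hk h1
      have hdrop : preds.drop k = preds.getD k 0 :: preds.drop (k + 1) := by
        rw [List.getD_eq_getElem _ _ hk]
        exact List.drop_eq_getElem_cons hk
      rw [geb_inner, dif_pos hk, h1]
      by_cases h2 : preds.getD k 0 = 2
      · by_cases hlast : k = preds.length - 1
        · have hk1 : k + 1 = preds.length := by omega
          rw [if_neg (by simpa using h2), if_pos ⟨by simpa using h2, hlast⟩]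
          rw [hdrop, h2]
          have : preds.drop (k + 1) = [] := by
            rw [hk1]; exact List.drop_length
          simp [this, fn2]
        · have hk1 : k + 1 < preds.length := by omega
          rw [if_neg (by simpa using h2), if_neg (by simp [hlast])]
          rw [ih (k + 1) (by omega) hk1 h1, hdrop, h2]
          simp [fn2]
          ring
      · rw [if_pos (by simpa using h2), hdrop]
        simp only [fn2, if_neg h2]
        simp

theorem spansSpec_flatMap (p : List Int) (i0 : Int) :
    spansSpec p i0 =
      (List.range p.length).flatMap (fun j =>
        if p.getD j 0 = 1 then [[i0 + (j : Int), i0 + (j : Int) + 1 + fn2 (p.drop (j + 1))]]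
        else []) := by
  induction p generalizing i0 with
  | nil => simp [spansSpec]
  | cons v r ih =>
      simp only [spansSpec, List.length_cons, List.range_succ_eq_map, List.flatMap_cons,
        List.flatMap_map]
      rw [ih (i0 + 1)]
      congr 1
      · simp only [List.getD_cons_zero, List.drop_succ_cons, List.drop_zero]
        split_ifs <;> simp
      · apply flatMap_congr'
        intro j _
        simp only [List.getD_cons_succ, List.drop_succ_cons]
        split_ifs <;> (simp; try ring_nf)

theorem geb_eq_extract (preds : List Int) :
    get_entity_boundary preds = extract_spans preds := by
  unfold get_entity_boundary
  have hstep : (fun (entityList : List (List Int)) idy =>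
      if preds.getD idy 0 = 1 then
        if idy = preds.length - 1 then entityList ++ [[(idy : Int), (idy : Int) + 1]]
        else entityList ++ geb_inner preds idy (idy + 1)
      else entityList)
      = fun entityList idy => entityList ++
          (if preds.getD idy 0 = 1 then
            if idy = preds.length - 1 then [[(idy : Int), (idy : Int) + 1]]
            else geb_inner preds idy (idy + 1)
          else []) := by
    funext acc idy; split_ifs <;> simp
  rw [hstep, PySem.List.foldl_append_eq_flatMap, List.nil_append,
    extract_spans_eq, spansSpec_flatMap preds 0]
  apply flatMap_congr'
  intro j hj
  have hjl : j < preds.length := List.mem_range.mp hj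
  split_ifs with hg hl
  · have hj1 : j + 1 = preds.length := by omega
    have : preds.drop (j + 1) = [] := by rw [hj1]; exact List.drop_length
    simp [this, fn2]
  · have hj1 : j + 1 < preds.length := by omega
    rw [geb_inner_eq preds j (j + 1) hj1 hg]
    simp
    try ring_nf
  · rfl

theorem foldl_triple {α β γ δ : Type} (L : List α) (f : α → β) (g : α → γ) (h : α → δ)
    (p : List β) (q : List γ) (r : List δ) :
    L.foldl (fun st x => (st.1 ++ [f x], st.2.1 ++ [g x], st.2.2 ++ [h x])) (p, q, r)
      = (p ++ L.map f, q ++ L.map g, r ++ L.map h) := by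
  induction L generalizing p q r with
  | nil => simp
  | cons x t ih => simp [ih]

theorem range_map_getD {α β : Type} (a : List α) (d : α) (F : α → β) :
    (List.range a.length).map (fun i => F (a.getD i d)) = a.map F := by
  induction a with
  | nil => simp
  | cons x t ih =>
      simp only [List.length_cons, List.range_succ_eq_map, List.map_cons, List.map_map,
        List.getD_cons_zero]
      exact congrArg _ (by simpa [Function.comp] using ih)

theorem range_map_getD2 {α β γ : Type} (a : List α) (o : List β) (d1 : α) (d2 : β)
    (h : a.length ≤ o.length) (F : α → β → γ) :
    (List.range a.length).map (fun i => F (a.getD i d1) (o.getD i d2))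
      = List.zipWith F a o := by
  induction a generalizing o with
  | nil => simp
  | cons x t ih =>
      cases o with
      | nil => simp at h
      | cons y o' =>
          simp only [List.length_cons, List.range_succ_eq_map, List.map_cons, List.map_map,
            List.getD_cons_zero, List.zipWith_cons_cons]
          exact congrArg _ (by simpa [Function.comp] using ih o' (by simpa using h))

theorem range_flatMap_take {α β : Type} (m : Nat) (l : List α) (d : α)
    (h : m ≤ l.length) (f : α → List β) :
    (List.range m).flatMap (fun i => f (l.getD i d)) = (l.take m).flatMap f := by
  induction l generalizing m with
  | nil =>
      have : m = 0 := by simpa using h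
      subst this; simp
  | cons y o' ih =>
      cases m with
      | zero => simp
      | succ k =>
          simp only [List.range_succ_eq_map, List.flatMap_cons, List.flatMap_map,
            List.getD_cons_zero, List.take_succ_cons]
          exact congrArg _ (by simpa [Function.comp] using ih k (by simpa using h))

theorem bp_opi_eq (row : List Int) (orow : List (List Int)) (h : row.length ≤ orow.length) :
    (List.range row.length).foldl (fun acc idy => acc ++ get_entity_boundary (orow.getD idy [])) []
      = (orow.take row.length).flatMap extract_spans := by
  rw [PySem.List.foldl_append_eq_flatMap, List.nil_append,
    show (fun idy => get_entity_boundary (orow.getD idy []))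
      = fun idy => extract_spans (orow.getD idy []) from funext fun _ => geb_eq_extract _]
  exact range_flatMap_take row.length orow [] h extract_spans

theorem inner_eq (s e : Int) (L : List (List Int))
    (hp : ∀ x ∈ L, ∃ a b, x = [a, b]) :
    ∀ acc, L.foldl (bp_ao_inner s e) acc = acc ++ L.map (mk4 s e) := by
  induction L with
  | nil => simp
  | cons op t ih =>
      intro acc
      obtain ⟨a, b, rfl⟩ := hp _ (List.mem_cons_self ..)
      simp [bp_ao_inner, mk4, ih (fun y hy => hp y (List.mem_cons_of_mem _ hy))]

theorem extract_pairs (l : List Int) :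
    ∀ x ∈ extract_spans l, ∃ a b, x = [a, b] := by
  intro x hx
  exact spansSpec_pairs l 0 x (by rwa [extract_spans_eq] at hx)

theorem outer_eq (orow : List (List Int)) (L : List (List Int))
    (hp : ∀ x ∈ L, ∃ a b, x = [a, b]) :
    ∀ acc, L.foldl (bp_ao_step orow) acc = acc ++ L.flatMap (bp_alt_item orow) := by
  induction L with
  | nil => simp
  | cons sp t ih =>
      intro acc
      obtain ⟨a, b, rfl⟩ := hp _ (List.mem_cons_self ..)
      simp only [List.foldl_cons, List.flatMap_cons, bp_ao_step, bp_alt_item]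
      rw [geb_eq_extract, inner_eq a b _ (extract_pairs _),
        ih (fun y hy => hp y (List.mem_cons_of_mem _ hy))]
      simp [List.append_assoc]

theorem bp_ao_eq (a : List (List Int)) (o : List (List (List Int))) (idx : Nat) :
    bp_ao a o idx = bp_alt_ao (a.getD idx []) (o.getD idx []) := by
  unfold bp_ao bp_alt_ao
  rw [geb_eq_extract]
  simpa using outer_eq (o.getD idx []) _ (extract_pairs _) []

-- ===== VERDICT (by name: the statement is the Claim_ definition above) =====
theorem build_pair_spec : Claim_equal_build_pair := by
  intro a o _hdom hpre
  obtain ⟨hlen, hrows⟩ := hpre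
  unfold Spec_build_pair build_pair build_pair_alt
  rw [foldl_triple]
  simp only [List.nil_append, Prod.mk.injEq]
  refine ⟨?_, ?_, ?_⟩
  · rw [show get_entity_boundary = extract_spans from funext geb_eq_extract]
    exact range_map_getD a [] extract_spans
  · have hopi : ∀ idx ∈ List.range a.length,
        bp_opi a o idx = ((o.getD idx []).take (a.getD idx []).length).flatMap extract_spans :=
      fun idx hidx => bp_opi_eq (a.getD idx []) (o.getD idx []) (hrows idx hidx)
    rw [List.map_congr_left hopi]
    exact range_map_getD2 a o [] [] hlen
      (fun a_row o_rows => (o_rows.take a_row.length).flatMap extract_spans)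
  · rw [List.map_congr_left (fun idx _ => bp_ao_eq a o idx)]
    exact range_map_getD2 a o [] [] hlen bp_alt_ao
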